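-- pv_equiv track=rewrite | github.com/samuelbeaubien/advent-of-code-2023 | src/day-13/gold.py | get_reflection_row
-- ===== SOURCE A (Python) =====
-- from typing import List
--
-- def get_difference_between_two_rows(row_1: str, row_2: str) -> int:
--     num_differences = 0
--     for c1, c2 in zip(row_1, row_2):
--         if c1 != c2:
--             num_differences += 1
--     return num_differences
--
-- def get_difference_between_reflection(pattern: List[str], reflection_row: int) -> bool:
--     # Split list at reflection_row
--     first_half = pattern[:reflection_row]
--     second_half = pattern[reflection_row:]
--     # Equalize
--     diff = abs(len(first_half) - len(second_half))
--     if len(first_half) > len(second_half):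
--         first_half = first_half[diff:]
--     if len(second_half) > len(first_half):
--         second_half = second_half[:-diff]
--     # Reverse
--     second_half_reversed = second_half
--     second_half_reversed.reverse()
--     # Count differences
--     total_differences = 0
--     for row_1, row_2 in zip(first_half, second_half_reversed):
--         total_differences += get_difference_between_two_rows(row_1, row_2)
--     return total_differences
--
-- def get_reflection_row(pattern: List[str]) -> int|None:
--     """The reflection row is the row directly after the reflection line.
--     """
--     # Find two rows that are the same
--     for i in range(len(pattern)):
--         j = i+1
--         if j < len(pattern):
--             cur = pattern[i]
--             next = pattern[j]
--             diff = get_difference_between_two_rows(cur, next)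
--             if diff == 0 or diff == 1:
--                 reflection_diff = get_difference_between_reflection(pattern, j)
--                 if reflection_diff == 1:
--                     return j
--     return None
-- ===== SOURCE B (Python) =====
-- def get_reflection_row(pattern):
--     """The reflection row is the row directly after the reflection line."""
--     n = len(pattern)
--     # Pass 1: pair-major bucket accumulation. Every mirrored pair of rows (a, b) with
--     # a < b and a + b odd belongs to exactly one candidate line j = (a + b + 1) // 2;
--     # add its Hamming distance into that bucket.
--     totals = [0] * (n + 1)
--     for a in range(n):
--         for b in range(a + 1, n, 2):
--             totals[(a + b + 1) // 2] += sum(c1 != c2 for c1, c2 in zip(pattern[a], pattern[b]))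
--     # Pass 2: first candidate line whose total mismatch count is exactly 1.
--     for j in range(1, n):
--         if totals[j] == 1:
--             return j
--     return None
-- ===== Notes on version B (the rewrite author's own statement) =====
-- stated objective: alternative
-- what changed: Replaces A's candidate-major scan (per candidate line: slice the pattern, equalize half lengths, reverse, zip, behind an adjacent-row pre-filter) by a pair-major bucket accumulation: one pass over all row pairs (a,b) with odd a+b adds each pair's mismatch count into a totals array indexed by the candidate line (a+b+1)//2, then a second pass returns the first line whose total is exactly 1.
import Mathlib
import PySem

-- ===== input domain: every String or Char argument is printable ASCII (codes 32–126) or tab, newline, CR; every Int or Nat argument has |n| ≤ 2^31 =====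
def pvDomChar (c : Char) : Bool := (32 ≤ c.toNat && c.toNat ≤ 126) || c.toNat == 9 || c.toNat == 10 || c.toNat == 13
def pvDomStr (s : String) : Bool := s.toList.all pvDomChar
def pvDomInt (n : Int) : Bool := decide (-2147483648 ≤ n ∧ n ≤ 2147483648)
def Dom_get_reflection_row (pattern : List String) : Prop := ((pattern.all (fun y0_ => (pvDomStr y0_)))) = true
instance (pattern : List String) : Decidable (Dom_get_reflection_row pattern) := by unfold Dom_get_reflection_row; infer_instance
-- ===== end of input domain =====

-- B replaces A's candidate-major scan (slice/equalize/reverse/zip per candidate, behind an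
-- adjacent-row pre-filter) by a pair-major bucket accumulation: one pass over all odd-distance
-- row pairs adds each pair's mismatch count into a per-candidate totals array, then a second
-- pass returns the first candidate line whose total is exactly 1 (objective: alternative).

-- ===== PORT A =====
-- get_difference_between_two_rows
def pvRowDiffA (row1 row2 : String) : Int :=
  (row1.toList.zip row2.toList).foldl
    (fun numDifferences p => if p.1 ≠ p.2 then numDifferences + 1 else numDifferences) 0

-- get_difference_between_reflection (despite the annotation it returns the int total)
def pvReflDiffA (pattern : List String) (reflectionRow : Int) : Int :=
  let firstHalf := PySem.List.slice pattern none (some reflectionRow)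
  let secondHalf := PySem.List.slice pattern (some reflectionRow) none
  let diff : Int := ((firstHalf.length : Int) - (secondHalf.length : Int)).natAbs
  let firstHalf := if firstHalf.length > secondHalf.length then PySem.List.slice firstHalf (some diff) none else firstHalf
  let secondHalf := if secondHalf.length > firstHalf.length then PySem.List.slice secondHalf none (some (-diff)) else secondHalf
  let secondHalfReversed := secondHalf.reverse
  (firstHalf.zip secondHalfReversed).foldl
    (fun totalDifferences p => totalDifferences + pvRowDiffA p.1 p.2) 0

-- the 'for i in range(len(pattern))' loop with early return
def pvALoop (pattern : List String) (i : Nat) : Option Int :=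
  if hi : i < pattern.length then
    if hj : i + 1 < pattern.length then
      -- cur = pattern[i], next = pattern[i+1], diff = get_difference_between_two_rows(cur, next)
      if pvRowDiffA pattern[i] pattern[i + 1] = 0 ∨ pvRowDiffA pattern[i] pattern[i + 1] = 1 then
        if pvReflDiffA pattern ((i : Int) + 1) = 1 then some ((i : Int) + 1)
        else pvALoop pattern (i + 1)
      else pvALoop pattern (i + 1)
    else pvALoop pattern (i + 1)
  else none
termination_by pattern.length - i

def get_reflection_row (pattern : List String) : Option Int :=
  pvALoop pattern 0

-- ===== PORT B =====
-- sum(c1 != c2 for c1, c2 in zip(row_1, row_2))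
def pvRowDiffB (row1 row2 : String) : Int :=
  ((row1.toList.zip row2.toList).map (fun p => if p.1 ≠ p.2 then (1 : Int) else 0)).sum

-- pass 1: 'for a in range(n): for b in range(a+1, n, 2): totals[(a+b+1)//2] += …'
-- (the bucket index (a+b+1)//2 is provably nonnegative and < n+1 here, so .toNat /
-- List.set / List.getD are exact for Python's list write/read)
def pvTotals (pattern : List String) : List Int :=
  (PySem.List.pyRange 0 (pattern.length : Int) 1).foldl (fun totals a =>
    (PySem.List.pyRange (a + 1) (pattern.length : Int) 2).foldl (fun totals b =>
      totals.set (PySem.Int.floordiv (a + b + 1) 2).toNat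
        (totals.getD (PySem.Int.floordiv (a + b + 1) 2).toNat 0
          + pvRowDiffB (PySem.List.pyGetD pattern a "") (PySem.List.pyGetD pattern b "")))
      totals)
    (List.replicate (pattern.length + 1) 0)

-- pass 2: 'for j in range(1, n): if totals[j] == 1: return j'
def pvBLoop (pattern : List String) (totals : List Int) (j : Nat) : Option Int :=
  if j < pattern.length then
    if totals.getD j 0 = 1 then some (j : Int) else pvBLoop pattern totals (j + 1)
  else none
termination_by pattern.length - j

def get_reflection_row_alt (pattern : List String) : Option Int :=
  pvBLoop pattern (pvTotals pattern) 1

-- ===== PRECONDITION & SPEC =====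
def Spec_get_reflection_row (pattern : List String) (out : Option Int) : Prop := out = get_reflection_row_alt pattern
instance (pattern : List String) (out : Option Int) : Decidable (Spec_get_reflection_row pattern out) := by unfold Spec_get_reflection_row; infer_instance

-- ===== CLAIM (what is proved, stated in full; the proofs are below) =====
def Claim_equal_get_reflection_row : Prop := ∀ (pattern : List String), Dom_get_reflection_row pattern → Spec_get_reflection_row pattern (get_reflection_row pattern)

-- ===== LEMMAS AND PROOFS =====

theorem rowDiffB_nonneg (a b : String) : 0 ≤ pvRowDiffB a b := by
  unfold pvRowDiffB
  apply List.sum_nonneg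
  intro x hx
  simp only [List.mem_map] at hx
  obtain ⟨p, _, rfl⟩ := hx
  split <;> omega

theorem rowDiffA_eq (a b : String) : pvRowDiffA a b = pvRowDiffB a b := by
  unfold pvRowDiffA pvRowDiffB
  generalize a.toList.zip b.toList = l
  suffices h : ∀ (l : List (Char × Char)) (c : Int),
      l.foldl (fun n p => if p.1 ≠ p.2 then n + 1 else n) c
        = c + (l.map (fun p => if p.1 ≠ p.2 then (1 : Int) else 0)).sum by
    simpa using h l 0
  intro l
  induction l with
  | nil => simp
  | cons p rest ih =>
      intro c
      rw [List.foldl_cons, List.map_cons, List.sum_cons]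
      split_ifs with hp <;> rw [ih] <;> ring

-- the total mismatch count across candidate line j, as a sum over the mirrored zip
def pvS (pattern : List String) (j : Nat) : Int :=
  ((((pattern.take j).reverse).zip (pattern.drop j)).map (fun p => pvRowDiffB p.1 p.2)).sum

-- the half-equalized zip of A is the reverse of the mirrored zip
theorem zip_trim_eq {α : Type} (a b : List α) :
    (a.drop (a.length - b.length)).zip ((b.take a.length).reverse)
      = ((a.reverse).zip b).reverse := by
  apply List.ext_getElem
  · simp; omega
  · intro i h1 h2
    simp only [List.length_zip, List.length_reverse, List.length_drop, List.length_take] at h1 h2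
    simp only [List.getElem_zip, List.getElem_reverse, List.getElem_drop, List.getElem_take,
      List.length_zip, List.length_reverse, List.length_take]
    have he : a.length - b.length + i = a.length - 1 - (min a.length b.length - 1 - i) := by
      omega
    simp only [he]

theorem reflDiffA_eq (pattern : List String) (j : Nat) :
    pvReflDiffA pattern (j : Int) = pvS pattern j := by
  unfold pvReflDiffA pvS
  rw [PySem.List.slice_to_natCast, PySem.List.slice_from_natCast]
  set a := pattern.take j with ha
  set b := pattern.drop j with hb
  have key : (if a.length > b.length then
                PySem.List.slice a (some (((a.length : Int) - (b.length : Int)).natAbs : Int)) none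
              else a).zip
             ((if b.length > (if a.length > b.length then
                  PySem.List.slice a (some (((a.length : Int) - (b.length : Int)).natAbs : Int)) none
                else a).length then
                PySem.List.slice b none (some (-(((a.length : Int) - (b.length : Int)).natAbs : Int)))
              else b).reverse)
        = ((a.reverse).zip b).reverse := by
    by_cases hab : a.length > b.length
    · have hd : (((a.length : Int) - (b.length : Int)).natAbs) = a.length - b.length := by omega
      rw [if_pos hab, hd, PySem.List.slice_from_natCast]
      have hlen : (a.drop (a.length - b.length)).length = b.length := by simp; omega
      rw [if_neg (by omega)]
      have hz := zip_trim_eq a b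
      rw [List.take_of_length_le (Nat.le_of_lt hab)] at hz
      exact hz
    · rw [if_neg hab]
      by_cases hba : b.length > a.length
      · have hd : (((a.length : Int) - (b.length : Int)).natAbs) = b.length - a.length := by omega
        rw [if_pos hba, hd,
            PySem.List.slice_to_neg_natCast b (b.length - a.length) (by omega)]
        have h2 : b.length - (b.length - a.length) = a.length := by omega
        rw [h2, ← zip_trim_eq a b]
        have : a.length - b.length = 0 := by omega
        rw [this, List.drop_zero]
      · have heq : a.length = b.length := by omega
        rw [if_neg (by omega), ← zip_trim_eq a b]
        simp [heq]
  simp only []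
  rw [key]
  have fold_sum : ∀ (l : List (String × String)) (c : Int),
      l.foldl (fun t p => t + pvRowDiffA p.1 p.2) c
        = c + (l.map (fun p => pvRowDiffB p.1 p.2)).sum := by
    intro l
    induction l with
    | nil => simp
    | cons p rest ih =>
        intro c
        rw [List.foldl_cons, List.map_cons, List.sum_cons, ih, rowDiffA_eq]
        ring
  rw [fold_sum]
  simp [List.map_reverse]

-- head decomposition of the mirrored zip at a valid line j = i+1
theorem pairs_cons (pattern : List String) (i : Nat) (h : i + 1 < pattern.length) :
    ((pattern.take (i + 1)).reverse).zip (pattern.drop (i + 1))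
      = (pattern[i], pattern[i + 1]) ::
        (((pattern.take i).reverse).zip (pattern.drop (i + 2))) := by
  have h1 : pattern.take (i + 1) = pattern.take i ++ [pattern[i]] :=
    List.take_succ_eq_append_getElem (by omega)
  have h2 : pattern.drop (i + 1) = pattern[i + 1] :: pattern.drop (i + 2) :=
    List.drop_eq_getElem_cons h
  rw [h1, h2, List.reverse_append]
  simp only [List.reverse_singleton, List.singleton_append, List.zip_cons_cons]

theorem S_one_head_small (pattern : List String) (i : Nat) (h : i + 1 < pattern.length)
    (hS : pvS pattern (i + 1) = 1) :
    pvRowDiffA pattern[i] pattern[i + 1] = 0 ∨ pvRowDiffA pattern[i] pattern[i + 1] = 1 := by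
  rw [rowDiffA_eq]
  unfold pvS at hS
  rw [pairs_cons pattern i h] at hS
  simp only [List.map_cons, List.sum_cons] at hS
  have hs : 0 ≤ ((((pattern.take i).reverse).zip (pattern.drop (i + 2))).map
      (fun p => pvRowDiffB p.1 p.2)).sum := by
    apply List.sum_nonneg
    intro x hx
    simp only [List.mem_map] at hx
    obtain ⟨q, _, rfl⟩ := hx
    exact rowDiffB_nonneg _ _
  have := rowDiffB_nonneg pattern[i] pattern[i + 1]
  omega

-- list-sum over a range as a Finset sum
theorem sum_map_range (n : Nat) (f : Nat → Int) :
    ((List.range n).map f).sum = ∑ a ∈ Finset.range n, f a := by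
  induction n with
  | zero => simp
  | succ n ih =>
      rw [List.range_succ, List.map_append, List.sum_append, Finset.sum_range_succ, ih]
      simp

-- range(lo, n, 2) enumerates lo + 2*k for k < (n - lo + 1)/2
theorem pyRange_step2 (lo n : Nat) :
    PySem.List.pyRange (lo : Int) (n : Int) 2
      = (List.range ((n - lo + 1) / 2)).map (fun k => ((lo + 2 * k : Nat) : Int)) := by
  rw [PySem.List.pyRange_of_pos (lo : Int) (n : Int) (by norm_num)]
  have hc : (if (lo : Int) < (n : Int) then (((n : Int) - lo + 2 - 1) / 2).toNat else 0)
      = (n - lo + 1) / 2 := by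
    split_ifs with h
    · have h1 : ((n : Int) - lo + 2 - 1) = ((n - lo + 1 : Nat) : Int) := by
        push_cast; omega
      rw [h1, show ((2 : Int)) = ((2 : Nat) : Int) from rfl, ← Int.natCast_div,
        Int.toNat_natCast]
    · omega
  rw [hc]
  apply List.map_congr_left
  intro k _
  push_cast; ring

-- getD/set helpers for one bucket update
theorem getD_set_add (t : List Int) (j : Nat) (v : Int) (h : j < t.length) :
    (t.set j (t.getD j 0 + v)).getD j 0 = t.getD j 0 + v := by
  rw [List.getD_eq_getElem?_getD, List.getElem?_set_self (by omega), Option.getD_some]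

theorem getD_set_ne (t : List Int) (i j : Nat) (v : Int) (h : i ≠ j) :
    (t.set i v).getD j 0 = t.getD j 0 := by
  rw [List.getD_eq_getElem?_getD, List.getElem?_set_ne h, ← List.getD_eq_getElem?_getD]

-- getD of a fold of in-range bucket updates: the filtered contributions add up
theorem getD_foldl_bump {β : Type} (f : β → Nat) (g : β → Int) (j : Nat) (l : List β)
    (t : List Int) (hf : ∀ x ∈ l, f x < t.length) :
    (l.foldl (fun t x => t.set (f x) (t.getD (f x) 0 + g x)) t).getD j 0
      = t.getD j 0 + ((l.filter (fun x => decide (f x = j))).map g).sum := by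
  induction l generalizing t with
  | nil => simp
  | cons b l ih =>
      simp only [List.foldl_cons, List.filter_cons]
      have hb : f b < t.length := hf b List.mem_cons_self
      rw [ih _ (fun x hx => by
        rw [List.length_set]; exact hf x (List.mem_cons_of_mem _ hx))]
      by_cases hfb : f b = j
      · rw [hfb, getD_set_add t j (g b) (by omega),
          if_pos (show decide (j = j) = true by simp), List.map_cons, List.sum_cons]
        ring
      · rw [getD_set_ne t (f b) j _ hfb, if_neg (by simp [hfb])]

theorem length_foldl_bump {β : Type} (f : β → Nat) (g : β → Int) (l : List β) (t : List Int) :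
    (l.foldl (fun t x => t.set (f x) (t.getD (f x) 0 + g x)) t).length = t.length := by
  induction l generalizing t with
  | nil => rfl
  | cons b l ih => simp only [List.foldl_cons]; rw [ih, List.length_set]

theorem range_filter_single (N c j : Nat) :
    (List.range N).filter (fun k => decide (c + k = j))
      = if c ≤ j ∧ j - c < N then [j - c] else [] := by
  induction N with
  | zero => simp
  | succ N ih =>
      rw [List.range_succ, List.filter_append, ih]
      by_cases h : c + N = j
      · have h1 : ¬ (c ≤ j ∧ j - c < N) := by omega
        have h2 : c ≤ j ∧ j - c < N + 1 := by omega
        have h3 : j - c = N := by omega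
        rw [if_neg h1, if_pos h2, h3]
        simp [h]
      · have h4 : (List.filter (fun k => decide (c + k = j)) [N]) = [] := by simp [h]
        rw [h4, List.append_nil]
        by_cases hc : c ≤ j ∧ j - c < N
        · rw [if_pos hc, if_pos (show c ≤ j ∧ j - c < N + 1 by omega)]
        · rw [if_neg hc, if_neg (show ¬ (c ≤ j ∧ j - c < N + 1) by omega)]

-- the contribution of outer-loop row a to bucket j
def pvC (pattern : List String) (j a : Nat) : Int :=
  if a + 1 ≤ j ∧ j - (a + 1) < (pattern.length - (a + 1) + 1) / 2 then
    pvRowDiffB (pattern.getD a "") (pattern.getD (a + 1 + 2 * (j - (a + 1))) "")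
  else 0

theorem foldl_getD_add {β : Type} (step : List Int → β → List Int) (c : β → Int) (L j : Nat)
    (hlen : ∀ t b, t.length = L → (step t b).length = L)
    (hstep : ∀ t b, t.length = L → (step t b).getD j 0 = t.getD j 0 + c b) :
    ∀ (l : List β) (t : List Int), t.length = L →
      (l.foldl step t).getD j 0 = t.getD j 0 + (l.map c).sum := by
  intro l
  induction l with
  | nil => intro t _; simp
  | cons b l ih =>
      intro t ht
      rw [List.foldl_cons, List.map_cons, List.sum_cons, ih _ (hlen t b ht), hstep t b ht]
      ring

theorem totals_getD (pattern : List String) (j : Nat) :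
    (pvTotals pattern).getD j 0 = ∑ a ∈ Finset.range pattern.length, pvC pattern j a := by
  unfold pvTotals
  rw [PySem.List.pyRange_zero_nat, List.foldl_map]
  have houter :
      (fun (totals : List Int) (a : Nat) =>
        (PySem.List.pyRange ((a : Int) + 1) (pattern.length : Int) 2).foldl (fun totals b =>
          totals.set (PySem.Int.floordiv ((a : Int) + b + 1) 2).toNat
            (totals.getD (PySem.Int.floordiv ((a : Int) + b + 1) 2).toNat 0
              + pvRowDiffB (PySem.List.pyGetD pattern (a : Int) "") (PySem.List.pyGetD pattern b "")))
          totals)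
      = (fun (totals : List Int) (a : Nat) =>
        (List.range ((pattern.length - (a + 1) + 1) / 2)).foldl (fun totals k =>
          totals.set (a + 1 + k)
            (totals.getD (a + 1 + k) 0
              + pvRowDiffB (pattern.getD a "") (pattern.getD (a + 1 + 2 * k) "")))
          totals) := by
    funext totals a
    rw [show ((a : Int) + 1) = (((a + 1 : Nat)) : Int) by push_cast; ring, pyRange_step2,
      List.foldl_map]
    congr 1
    funext t k
    have h1 : ((a : Int) + ((a + 1 + 2 * k : Nat) : Int) + 1) = ((2 * (a + 1 + k) : Nat) : Int) := by
      push_cast; ring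
    rw [h1,
      show PySem.Int.floordiv ((2 * (a + 1 + k) : Nat) : Int) 2 = (((2 * (a + 1 + k)) / 2 : Nat) : Int)
        from by exact_mod_cast PySem.Int.floordiv_natCast (2 * (a + 1 + k)) 2,
      show (2 * (a + 1 + k)) / 2 = a + 1 + k from by omega,
      Int.toNat_natCast, PySem.List.pyGetD_natCast, PySem.List.pyGetD_natCast]
  rw [houter]
  rw [foldl_getD_add _ (pvC pattern j) (pattern.length + 1) j
      (fun t a ht => by rw [length_foldl_bump]; exact ht)
      (fun t a ht => by
        rw [getD_foldl_bump (fun k => a + 1 + k) _ j _ t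
            (fun k hk => by
              simp only [List.mem_range] at hk
              rw [ht]
              show a + 1 + k < pattern.length + 1
              omega),
          range_filter_single]
        unfold pvC
        split_ifs with hcond <;> simp)
      (List.range pattern.length) _ (by simp)]
  rw [sum_map_range]
  have hrep : (List.replicate (pattern.length + 1) (0 : Int)).getD j 0 = 0 := by
    rcases Nat.lt_or_ge j (pattern.length + 1) with h | h
    · rw [List.getD_replicate _ h]
    · rw [List.getD_eq_getElem?_getD, List.getElem?_eq_none (by simpa using h)]
      rfl
  rw [hrep, zero_add]

-- the mirrored zip, element by element
theorem zip_eq_map (pattern : List String) (j : Nat) :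
    ((pattern.take j).reverse).zip (pattern.drop j)
      = (List.range (min j (pattern.length - j))).map
          (fun k => (pattern.getD (j - 1 - k) "", pattern.getD (j + k) "")) := by
  apply List.ext_getElem
  · simp only [List.length_zip, List.length_reverse, List.length_take, List.length_drop,
      List.length_map, List.length_range]
    omega
  · intro i h1 h2
    simp only [List.length_zip, List.length_reverse, List.length_take, List.length_drop] at h1
    simp only [List.length_map, List.length_range] at h2
    have hj : j < pattern.length := by omega
    simp only [List.getElem_zip, List.getElem_reverse, List.getElem_take, List.getElem_drop,
      List.getElem_map, List.getElem_range, List.length_take]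
    simp only [Nat.min_eq_left (Nat.le_of_lt hj)]
    rw [← List.getD_eq_getElem pattern "" (show j - 1 - i < pattern.length by omega),
      ← List.getD_eq_getElem pattern "" (show j + i < pattern.length by omega)]

theorem S_eq_sum (pattern : List String) (j : Nat) :
    pvS pattern j = ∑ k ∈ Finset.range (min j (pattern.length - j)),
      pvRowDiffB (pattern.getD (j - 1 - k) "") (pattern.getD (j + k) "") := by
  unfold pvS
  rw [zip_eq_map, List.map_map, sum_map_range]
  rfl

theorem totals_eq_S (pattern : List String) (j : Nat) :
    (pvTotals pattern).getD j 0 = pvS pattern j := by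
  rw [totals_getD, S_eq_sum]
  unfold pvC
  rw [← Finset.sum_filter]
  refine Finset.sum_nbij' (fun a => j - 1 - a) (fun k => j - 1 - k) ?_ ?_ ?_ ?_ ?_
  · intro a ha
    simp only [Finset.mem_filter, Finset.mem_range] at ha
    show j - 1 - a ∈ Finset.range (min j (pattern.length - j))
    simp only [Finset.mem_range]
    omega
  · intro k hk
    simp only [Finset.mem_range] at hk
    show j - 1 - k ∈ (Finset.range pattern.length).filter _
    simp only [Finset.mem_filter, Finset.mem_range]
    omega
  · intro a ha
    simp only [Finset.mem_filter, Finset.mem_range] at ha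
    show j - 1 - (j - 1 - a) = a
    omega
  · intro k hk
    simp only [Finset.mem_range] at hk
    show j - 1 - (j - 1 - k) = k
    omega
  · intro a ha
    simp only [Finset.mem_filter, Finset.mem_range] at ha
    show pvRowDiffB (pattern.getD a "") (pattern.getD (a + 1 + 2 * (j - (a + 1))) "")
        = pvRowDiffB (pattern.getD (j - 1 - (j - 1 - a)) "") (pattern.getD (j + (j - 1 - a)) "")
    rw [show j - 1 - (j - 1 - a) = a from by omega,
      show j + (j - 1 - a) = a + 1 + 2 * (j - (a + 1)) from by omega]

theorem loop_eq (pattern : List String) :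
    ∀ k i, pattern.length - i ≤ k →
      pvALoop pattern i = pvBLoop pattern (pvTotals pattern) (i + 1) := by
  intro k
  induction k with
  | zero =>
      intro i hk
      rw [pvALoop, pvBLoop]
      rw [dif_neg (by omega), if_neg (by omega)]
  | succ k ih =>
      intro i hk
      by_cases hi : i < pattern.length
      · rw [pvALoop, dif_pos hi]
        by_cases hj : i + 1 < pattern.length
        · rw [dif_pos hj, pvBLoop, if_pos hj, totals_eq_S]
          have hrefl : pvReflDiffA pattern ((i : Int) + 1) = pvS pattern (i + 1) := by
            have := reflDiffA_eq pattern (i + 1)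
            simpa using this
          by_cases hS : pvS pattern (i + 1) = 1
          · rw [if_pos hS]
            rw [if_pos (S_one_head_small pattern i hj hS),
              if_pos (show pvReflDiffA pattern ((i : Int) + 1) = 1 by rw [hrefl]; exact hS)]
            norm_cast
          · rw [if_neg hS]
            have hrec : pvALoop pattern (i + 1) = pvBLoop pattern (pvTotals pattern) (i + 2) :=
              ih (i + 1) (by omega)
            have hr1 : ¬ pvReflDiffA pattern ((i : Int) + 1) = 1 := by rw [hrefl]; exact hS
            rw [if_neg hr1, ite_self]
            exact hrec
        · rw [dif_neg hj, pvBLoop, if_neg hj]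
          rw [ih (i + 1) (by omega), pvBLoop, if_neg (by omega)]
      · rw [pvALoop, dif_neg hi, pvBLoop, if_neg (by omega)]

-- ===== VERDICT (by name: the statement is the Claim_ definition above) =====
theorem get_reflection_row_spec : Claim_equal_get_reflection_row := by
  intro pattern _
  unfold Spec_get_reflection_row get_reflection_row get_reflection_row_alt
  exact loop_eq pattern (pattern.length) 0 (by omega)
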